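-- pv_equiv track=rewrite | github.com/scarpent/chesser | chesser/management/commands/reset_and_schedule.py | _evenly_spread_extra
-- ===== SOURCE A (Python) =====
-- from typing import Deque, Dict, List
--
-- def _evenly_spread_extra(total_days: int, extra_count: int) -> List[bool]:
--     """
--     For i in [0..total_days-1], mark day i as True if it should receive an "extra Black"
--     (i.e., 3B/1W instead of 2B/2W). This spreads 'extra_count' days evenly.
--     Uses a balanced rounding / largest-remainder style rule.
--     """
--     flags = []
--     prev = 0
--     for i in range(1, total_days + 1):
--         # target extras up to this day:
--         target = (i * extra_count) // total_days
--         flags.append(target > prev)  # True when we increment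
--         prev = target
--     return flags
-- ===== SOURCE B (Python) =====
-- from typing import List
--
-- def _evenly_spread_extra(total_days: int, extra_count: int) -> List[bool]:
--     flags = []
--     acc = 0
--     for _ in range(total_days):
--         acc += extra_count
--         if acc >= total_days:
--             acc -= total_days
--             flags.append(True)
--         else:
--             flags.append(False)
--     return flags
-- ===== Notes on version B (the rewrite author's own statement) =====
-- stated objective: alternative
-- what changed: Replaced A's per-iteration recomputation of the cumulative target (i*extra_count)//total_days (an integer division and multiplication every step) with a Bresenham-style running remainder: acc += extra_count, flag and subtract total_days when acc reaches it; the Lean port of B is a structural recursion building the list front-to-back versus A's fold with append.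
import Mathlib
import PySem

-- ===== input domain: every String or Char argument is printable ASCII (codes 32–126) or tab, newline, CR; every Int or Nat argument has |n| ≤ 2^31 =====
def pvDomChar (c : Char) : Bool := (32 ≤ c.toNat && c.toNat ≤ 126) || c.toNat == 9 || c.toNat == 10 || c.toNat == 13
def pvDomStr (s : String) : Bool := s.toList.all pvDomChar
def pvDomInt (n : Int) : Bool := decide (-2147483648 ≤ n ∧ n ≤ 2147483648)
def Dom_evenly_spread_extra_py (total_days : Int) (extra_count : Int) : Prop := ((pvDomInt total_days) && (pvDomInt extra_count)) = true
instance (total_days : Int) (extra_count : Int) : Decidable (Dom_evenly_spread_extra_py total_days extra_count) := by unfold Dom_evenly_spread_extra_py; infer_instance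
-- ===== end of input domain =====

-- B replaces A's per-step recomputation of the cumulative target (i*extra_count)//total_days
-- by a Bresenham-style division-free running remainder; objective: alternative.

-- ===== PORT A =====
-- loop body of A: target = (i*extra_count)//total_days; flags.append(target > prev); prev = target
def stepA (total_days extra_count : Int) (st : List Bool × Int) (i : Int) : List Bool × Int :=
  let target := PySem.Int.floordiv (i * extra_count) total_days
  (st.1 ++ [decide (st.2 < target)], target)

def evenly_spread_extra_py (total_days : Int) (extra_count : Int) : List Bool :=
  ((PySem.List.pyRange 1 (total_days + 1) 1).foldl (stepA total_days extra_count) ([], 0)).1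

-- ===== PORT B =====
-- Source B's loop as the obvious structural recursion on the remaining iteration count:
-- acc += extra_count; if acc >= total_days: acc -= total_days, emit True; else emit False.
def bLoop (total_days extra_count : Int) (acc : Int) : Nat → List Bool
  | 0 => []
  | n + 1 =>
    let acc' := acc + extra_count
    if total_days ≤ acc' then true :: bLoop total_days extra_count (acc' - total_days) n
    else false :: bLoop total_days extra_count acc' n

def evenly_spread_extra_py_alt (total_days : Int) (extra_count : Int) : List Bool :=
  bLoop total_days extra_count 0 total_days.toNat

-- ===== PRECONDITION & SPEC =====
def Spec_evenly_spread_extra_py (total_days : Int) (extra_count : Int) (out : List Bool) : Prop := out = evenly_spread_extra_py_alt total_days extra_count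
instance (total_days : Int) (extra_count : Int) (out : List Bool) : Decidable (Spec_evenly_spread_extra_py total_days extra_count out) := by unfold Spec_evenly_spread_extra_py; infer_instance

-- ===== CLAIM =====
def Claim_equal_evenly_spread_extra_py : Prop := ∀ (total_days : Int) (extra_count : Int), Dom_evenly_spread_extra_py total_days extra_count → Spec_evenly_spread_extra_py total_days extra_count (evenly_spread_extra_py total_days extra_count)

-- ===== LEMMAS AND PROOFS =====

-- Closed form of B's running accumulator after m iterations.
def accB (t e : Int) (m : Nat) : Int :=
  if e < 0 then (m : Int) * e else if e ≤ t then ((m : Int) * e) % t else (m : Int) * (e - t)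

-- One synchronized step: B's branch condition at state accB t e m equals A's flag
-- (the cumulative target increments), and B's new accumulator is accB t e (m+1).
theorem step_core (t e : Int) (ht : 0 < t) (m : Nat) :
    ((t ≤ accB t e m + e) ↔ ((m : Int) * e) / t < (((m : Int) + 1) * e) / t)
    ∧ (if t ≤ accB t e m + e then accB t e m + e - t else accB t e m + e) = accB t e (m + 1) := by
  set a : Int := (m : Int) * e with ha
  have hq : t * (a / t) + a % t = a := Int.mul_ediv_add_emod a t
  have hr0 : 0 ≤ a % t := Int.emod_nonneg a (ne_of_gt ht)
  have hrt : a % t < t := Int.emod_lt_of_pos a ht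
  have harg : ((m : Int) + 1) * e = a + e := by rw [ha]; ring
  have hsplit : (a + e) / t = a / t + (a % t + e) / t := by
    conv_lhs => rw [show a + e = (a % t + e) + t * (a / t) by linarith]
    rw [Int.add_mul_ediv_left _ _ (ne_of_gt ht)]; ring
  have hmod : (a + e) % t = (a % t + e) % t := by
    conv_lhs => rw [show a + e = (a % t + e) + t * (a / t) by linarith]
    rw [Int.add_mul_emod_self_left]
  have hcast : ((m + 1 : Nat) : Int) * e = a + e := by push_cast [ha]; ring
  by_cases he : e < 0
  · have hacc : accB t e m = a := by unfold accB; rw [if_pos he]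
    have hale : a ≤ 0 := by
      have h := mul_le_mul_of_nonneg_left (le_of_lt he) (Int.natCast_nonneg m)
      simpa [ha] using h
    have hlt : ¬ t ≤ a + e := by omega
    have hdle : (a % t + e) / t ≤ 0 := by
      have hm := Int.ediv_le_ediv ht (show a % t + e ≤ a % t by omega)
      rwa [Int.ediv_eq_zero_of_lt hr0 hrt] at hm
    rw [hacc, if_neg hlt]
    constructor
    · rw [harg, hsplit]
      constructor
      · intro h; exact absurd h hlt
      · intro h; omega
    · unfold accB; rw [if_pos he, hcast]
  · push Not at he
    by_cases het : e ≤ t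
    · have hacc : accB t e m = a % t := by unfold accB; rw [if_neg (by omega), if_pos het]
      have haccs : accB t e (m + 1) = (a + e) % t := by
        unfold accB; rw [if_neg (by omega), if_pos het, hcast]
      rw [hacc, haccs, harg, hsplit, hmod]
      by_cases hge : t ≤ a % t + e
      · have hd1 : (a % t + e) / t = 1 := by
          conv_lhs => rw [show a % t + e = (a % t + e - t) + t * 1 by ring]
          rw [Int.add_mul_ediv_left _ _ (ne_of_gt ht),
            Int.ediv_eq_zero_of_lt (by omega) (by omega)]
          norm_num
        have hm1 : (a % t + e) % t = a % t + e - t := by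
          conv_lhs => rw [show a % t + e = (a % t + e - t) + t * 1 by ring]
          rw [Int.add_mul_emod_self_left, Int.emod_eq_of_lt (by omega) (by omega)]
        rw [if_pos hge, hd1, hm1]
        exact ⟨⟨fun _ => by omega, fun _ => hge⟩, rfl⟩
      · have hd0 : (a % t + e) / t = 0 := Int.ediv_eq_zero_of_lt (by omega) (by omega)
        have hm0 : (a % t + e) % t = a % t + e := Int.emod_eq_of_lt (by omega) (by omega)
        rw [if_neg hge, hd0, hm0]
        exact ⟨⟨fun h => absurd h hge, fun h => by omega⟩, rfl⟩
    · push Not at het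
      have hacc : accB t e m = (m : Int) * (e - t) := by
        unfold accB; rw [if_neg (by omega), if_neg (by omega)]
      have hbn : 0 ≤ (m : Int) * (e - t) := mul_nonneg (Int.natCast_nonneg m) (by omega)
      have hge : t ≤ (m : Int) * (e - t) + e := by omega
      have hd1 : 1 ≤ (a % t + e) / t := by
        rw [Int.le_ediv_iff_mul_le ht]; omega
      rw [hacc, if_pos hge]
      constructor
      · rw [harg, hsplit]
        exact ⟨fun _ => by omega, fun _ => hge⟩
      · unfold accB
        rw [if_neg (by omega), if_neg (by omega)]
        push_cast
        ring

-- A's loop, started after m completed iterations with prev = (m*e)//t and the flags so far,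
-- produces exactly what B's recursion produces from the accumulator accB t e m.
theorem loops_agree (t e : Int) (ht : 0 < t) (n : Nat) :
    ∀ (m : Nat) (fl : List Bool),
    (((List.range n).map (fun k : Nat => ((m : Int) + 1) + (k : Int))).foldl (stepA t e)
        (fl, ((m : Int) * e) / t)).1
      = fl ++ bLoop t e (accB t e m) n := by
  induction n with
  | zero => intro m fl; rw [List.range_zero]; simp [bLoop]
  | succ n ih =>
    intro m fl
    rw [List.range_succ_eq_map]
    simp only [List.map_cons, List.foldl_cons, List.map_map, Nat.cast_zero, add_zero]
    obtain ⟨hiff, hnext⟩ := step_core t e ht m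
    have hflag : decide (((m : Int) * e) / t < (((m : Int) + 1) * e) / t)
        = decide (t ≤ accB t e m + e) := by
      simp only [decide_eq_decide]; exact hiff.symm
    have hcast1 : ((m : Int) + 1) * e / t = (((m + 1 : Nat) : Int)) * e / t := by
      push_cast; ring_nf
    have hstep : stepA t e (fl, ((m : Int) * e) / t) ((m : Int) + 1)
        = (fl ++ [decide (t ≤ accB t e m + e)], (((m + 1 : Nat) : Int)) * e / t) := by
      unfold stepA
      simp only [PySem.Int.floordiv_eq_ediv_of_pos ht]
      rw [hflag, hcast1]
    have hmaps : ((List.range n).map ((fun k : Nat => ((m : Int) + 1) + (k : Int)) ∘ Nat.succ))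
        = (List.range n).map (fun k : Nat => (((m + 1 : Nat) : Int) + 1) + (k : Int)) := by
      apply List.map_congr_left
      intro x _
      simp only [Function.comp_apply, Nat.succ_eq_add_one]
      push_cast
      ring
    rw [hstep, hmaps, ih (m + 1) (fl ++ [decide (t ≤ accB t e m + e)])]
    rcases le_or_gt t (accB t e m + e) with hc | hc
    · have hbstep : bLoop t e (accB t e m) (n + 1)
          = true :: bLoop t e (accB t e m + e - t) n := by
        unfold bLoop; rw [if_pos hc]; cases n <;> rfl
      rw [hbstep, decide_eq_true hc]
      have hacc : accB t e m + e - t = accB t e (m + 1) := by rw [← hnext, if_pos hc]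
      rw [hacc]
      simp
    · have hbstep : bLoop t e (accB t e m) (n + 1)
          = false :: bLoop t e (accB t e m + e) n := by
        unfold bLoop; rw [if_neg (not_le.mpr hc)]; cases n <;> rfl
      rw [hbstep, decide_eq_false (not_le.mpr hc)]
      have hacc : accB t e m + e = accB t e (m + 1) := by rw [← hnext, if_neg (not_le.mpr hc)]
      rw [hacc]
      simp

-- ===== VERDICT =====
theorem evenly_spread_extra_py_spec : Claim_equal_evenly_spread_extra_py := by
  intro t e _
  unfold Spec_evenly_spread_extra_py evenly_spread_extra_py evenly_spread_extra_py_alt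
  by_cases ht : t ≤ 0
  · rw [PySem.List.pyRange_one_eq_nil (by omega), Int.toNat_of_nonpos ht]
    rfl
  · push Not at ht
    have hzero : accB t e 0 = 0 := by unfold accB; split_ifs <;> simp
    have hlist : PySem.List.pyRange 1 (t + 1) 1
        = (List.range t.toNat).map (fun k : Nat => (((0 : Nat) : Int) + 1) + (k : Int)) := by
      rw [PySem.List.pyRange_one, show t + 1 - 1 = t by ring]
      apply List.map_congr_left
      intro x _
      push_cast
      ring
    have h := loops_agree t e ht t.toNat 0 []
    rw [hzero] at h
    simp only [Nat.cast_zero, zero_mul, Int.zero_ediv, List.nil_append] at h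
    rw [hlist]
    exact h
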